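-- pv_equiv track=rewrite | github.com/Tuantgtsbn/Python-CodePTIT | CodePTIT/PY01043.py | check
-- ===== SOURCE A (Python) =====
-- def check(number):
--     s=str(number)
--     tmp=s[::-1]
--     if(s==tmp):
--         for i in range(len(s)):
--             if(int(s[i])%2):
--                 return False
--         return True
--     return False
-- ===== SOURCE B (Python) =====
-- def check(number):
--     s = str(number)
--     n = len(s)
--     for i in range(n):
--         if s[i] != s[n - 1 - i]:
--             return False
--         if int(s[i]) % 2:
--             return False
--     return True
-- ===== Notes on version B (the rewrite author's own statement) =====
-- stated objective: alternative
-- what changed: A reverses the whole string, compares, and then runs a second loop converting each digit; B makes a single indexed pass that checks the mirror character and the digit's parity together, never materialising the reversed string.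
import Mathlib
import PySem

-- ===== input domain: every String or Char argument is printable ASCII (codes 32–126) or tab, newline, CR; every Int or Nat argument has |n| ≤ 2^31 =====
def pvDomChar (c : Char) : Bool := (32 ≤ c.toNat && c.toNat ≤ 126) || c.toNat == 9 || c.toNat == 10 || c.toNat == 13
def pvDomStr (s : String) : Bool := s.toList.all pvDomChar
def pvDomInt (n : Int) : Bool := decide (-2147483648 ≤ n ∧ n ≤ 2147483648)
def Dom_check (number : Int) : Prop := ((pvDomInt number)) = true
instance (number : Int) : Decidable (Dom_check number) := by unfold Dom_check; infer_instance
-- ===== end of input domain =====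

-- B replaces A's reverse-then-compare plus a second digit loop with one indexed pass checking mirror equality and digit parity together.


-- ===== PORT A =====
-- for i in range(len(s)): if int(s[i]) % 2: return False  — structural recursion over s;
-- int(s[i]) is PySem.Int.ofChars? on the single char (never none here: the loop only runs on digit strings)
def checkEvenLoop : List Char → Bool
  | [] => true
  | c :: cs =>
      if PySem.Int.mod ((PySem.Int.ofChars? [c]).getD 0) 2 ≠ 0 then false
      else checkEvenLoop cs

def check (number : Int) : Bool :=
  let s := PySem.Int.toChars number
  let tmp := (PySem.List.slice? s none none (-1)).getD []   -- s[::-1]; slice? with step -1 is always some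
  if s = tmp then checkEvenLoop s else false

-- ===== PORT B =====
-- single forward pass: mirror-character check, then digit-parity check, at each index
def checkAltLoop (s : List Char) (i : Nat) : Bool :=
  if h : i < s.length then
    if s[i] ≠ s[s.length - 1 - i] then false
    else if PySem.Int.mod ((PySem.Int.ofChars? [s[i]]).getD 0) 2 ≠ 0 then false
    else checkAltLoop s (i + 1)
  else true
termination_by s.length - i

def check_alt (number : Int) : Bool :=
  let s := PySem.Int.toChars number
  checkAltLoop s 0

-- ===== PRECONDITION & SPEC =====
def Spec_check (number : Int) (out : Bool) : Prop := out = check_alt number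
instance (number : Int) (out : Bool) : Decidable (Spec_check number out) := by unfold Spec_check; infer_instance

-- ===== CLAIM (what is proved, stated in full; the proofs are below) =====
def Claim_equal_check : Prop := ∀ (number : Int), Dom_check number → Spec_check number (check number)

-- ===== LEMMAS AND PROOFS =====

def oddDigit (c : Char) : Bool := PySem.Int.mod ((PySem.Int.ofChars? [c]).getD 0) 2 ≠ 0

theorem checkEvenLoop_eq_all (s : List Char) : checkEvenLoop s = s.all (fun c => !oddDigit c) := by
  induction s with
  | nil => rfl
  | cons c cs ih =>
      rw [checkEvenLoop]
      by_cases hodd : PySem.Int.mod ((PySem.Int.ofChars? [c]).getD 0) 2 ≠ 0 <;>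
        simp [oddDigit, hodd, ih]

theorem checkAltLoop_true_iff (s : List Char) (i : Nat) :
    checkAltLoop s i = true ↔
      ∀ j, i ≤ j → (h : j < s.length) → s[j] = s[s.length - 1 - j] ∧ oddDigit s[j] = false := by
  fun_induction checkAltLoop s i with
  | case1 i h hmir =>
      simp only [Bool.false_eq_true, false_iff]
      intro hall
      exact hmir (by simpa using (hall i le_rfl h).1)
  | case2 i h hmir hodd =>
      simp only [Bool.false_eq_true, false_iff]
      intro hall
      have h2 := (hall i le_rfl h).2
      simp only [oddDigit, decide_eq_false_iff_not, ne_eq, not_not] at h2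
      exact hodd h2
  | case3 i h hmir hodd ih =>
      rw [ih]
      constructor
      · intro hall j hij hj
        rcases Nat.lt_or_ge i j with hlt | hge
        · exact hall j hlt hj
        · have : j = i := le_antisymm (le_of_not_gt (by omega)) hij
          subst this
          refine ⟨by simpa using hmir, ?_⟩
          simp only [oddDigit]
          simpa using hodd
      · intro hall j hij hj; exact hall j (le_of_lt hij) hj
  | case4 i h =>
      simp only [true_iff]
      intro j hij hj; omega

theorem palindrome_of_mirror (s : List Char)
    (h : ∀ j, (hj : j < s.length) → s[j] = s[s.length - 1 - j]) : s = s.reverse := by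
  apply List.ext_getElem (by simp)
  intro j hj hj'
  rw [List.getElem_reverse]
  exact h j hj

theorem mirror_of_palindrome (s : List Char) (h : s = s.reverse)
    (j : Nat) (hj : j < s.length) : s[j] = s[s.length - 1 - j] := by
  have := List.getElem_of_eq h hj
  rw [this, List.getElem_reverse]

theorem check_eq_check_alt (number : Int) : check number = check_alt number := by
  simp only [check, check_alt, PySem.List.slice?_none_none_neg_one, Option.getD_some]
  set s := PySem.Int.toChars number with hs
  by_cases hpal : s = s.reverse
  · rw [if_pos hpal]
    rw [Bool.eq_iff_iff, checkEvenLoop_eq_all, checkAltLoop_true_iff]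
    simp only [List.all_eq_true]
    constructor
    · intro hall j _ hj
      exact ⟨mirror_of_palindrome s hpal j hj, by simpa using hall s[j] (s.getElem_mem hj)⟩
    · intro hall c hc
      obtain ⟨j, hj, rfl⟩ := List.getElem_of_mem hc
      simpa using (hall j (Nat.zero_le j) hj).2
  · rw [if_neg hpal]
    rcases hb : checkAltLoop s 0 with _ | _
    · rfl
    · exfalso
      apply hpal
      apply palindrome_of_mirror
      intro j hj
      exact ((checkAltLoop_true_iff s 0).1 hb j (Nat.zero_le j) hj).1

-- ===== VERDICT (by name: the statement is the Claim_ definition above) =====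
theorem check_spec : Claim_equal_check := by
  intro number _
  unfold Spec_check
  exact check_eq_check_alt number
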